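-- pv_equiv track=rewrite | github.com/GarrettPetersen/three-kingdoms-tactics | tools/narrative_workflow.py | infer_pov_chars
-- ===== SOURCE A (Python) =====
-- POV_CHARACTER_KEYS = {"liubei", "caocao"}
--
-- def normalize_name(value: str) -> str:
--     return "".join(ch.lower() for ch in value if ch.isalnum())
--
-- def infer_pov_chars(major_chars: list[str]) -> list[str]:
--     aliases = {"liubei": "liubei", "caocao": "caocao"}
--     out = []
--     seen = set()
--     for name in major_chars:
--         canonical = aliases.get(normalize_name(name))
--         if canonical in POV_CHARACTER_KEYS and canonical not in seen:
--             seen.add(canonical)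
--             out.append(name)
--     return out
-- ===== SOURCE B (Python) =====
-- POV_CHARACTER_KEYS = {"liubei", "caocao"}
--
-- def normalize_name(value: str) -> str:
--     return "".join(ch.lower() for ch in value if ch.isalnum())
--
-- def infer_pov_chars(major_chars: list[str]) -> list[str]:
--     found = []
--     for key in ("liubei", "caocao"):
--         for i, name in enumerate(major_chars):
--             if normalize_name(name) == key:
--                 found.append((i, name))
--                 break
--     found.sort(key=lambda p: p[0])
--     return [name for _, name in found]
-- ===== Notes on version B (the rewrite author's own statement) =====
-- stated objective: alternative
-- what changed: A makes a single pass over major_chars with a seen-set; B instead scans for each POV key's first matching occurrence (index, name), then sorts the hits by first index and returns their names, so the seen-set and the per-element alias/membership branching disappear.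
import Mathlib
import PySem

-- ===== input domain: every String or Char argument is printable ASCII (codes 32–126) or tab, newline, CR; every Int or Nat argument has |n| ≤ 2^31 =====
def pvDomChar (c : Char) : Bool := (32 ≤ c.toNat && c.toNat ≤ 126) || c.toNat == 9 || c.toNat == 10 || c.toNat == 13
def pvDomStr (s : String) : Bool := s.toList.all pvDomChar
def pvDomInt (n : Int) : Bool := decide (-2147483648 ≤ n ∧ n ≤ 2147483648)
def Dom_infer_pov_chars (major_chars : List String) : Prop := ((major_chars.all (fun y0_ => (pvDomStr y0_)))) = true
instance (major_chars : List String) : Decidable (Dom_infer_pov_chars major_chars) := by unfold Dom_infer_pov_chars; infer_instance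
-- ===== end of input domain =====

-- B replaces A's single pass with a seen-set by a per-POV-key first-occurrence scan
-- whose hits are sorted back into appearance order (objective: alternative; same cost).

-- ===== PORT A =====
-- normalize_name: "".join(ch.lower() for ch in value if ch.isalnum())  (shared helper of both versions)
def pvNormalize (value : String) : String :=
  String.ofList ((value.toList.filter (fun ch => PySem.Chars.isalnum ch)).map PySem.Chars.lowerChar)

-- POV_CHARACTER_KEYS = {"liubei", "caocao"}
def pvPOVKeys : PySem.Set String := PySem.Set.ofList ["liubei", "caocao"]

def pvStepA (st : List String × PySem.Set String) (name : String) :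
    List String × PySem.Set String :=
  match PySem.Dict.get? (PySem.Dict.mk [("liubei", "liubei"), ("caocao", "caocao")]) (pvNormalize name) with
  | some canonical =>
      if PySem.Set.contains pvPOVKeys canonical && !(PySem.Set.contains st.2 canonical)
      then (st.1 ++ [name], PySem.Set.add st.2 canonical)
      else st
  | none => st   -- canonical is None: 'None in POV_CHARACTER_KEYS' is False

def infer_pov_chars (major_chars : List String) : List String :=
  (major_chars.foldl pvStepA ([], PySem.Set.empty)).1

-- ===== PORT B =====
-- inner loop of Source B: 'for i, name in enumerate(major_chars): if normalize_name(name) == key: …; break'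
def pvFindFirst (major_chars : List String) (key : String) (i : Int) : Option (Int × String) :=
  match major_chars with
  | [] => none
  | name :: rest =>
      if pvNormalize name == key then some (i, name) else pvFindFirst rest key (i + 1)

def infer_pov_chars_alt (major_chars : List String) : List String :=
  let found := (["liubei", "caocao"].foldl
    (fun (acc : List (Int × String)) key =>
      match pvFindFirst major_chars key 0 with
      | some p => acc ++ [p]
      | none => acc) [])
  (PySem.List.sorted found (fun p => p.1) false).map (fun p => p.2)

-- ===== PRECONDITION & SPEC =====
def Spec_infer_pov_chars (major_chars : List String) (out : List String) : Prop := out = infer_pov_chars_alt major_chars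
instance (major_chars : List String) (out : List String) : Decidable (Spec_infer_pov_chars major_chars out) := by unfold Spec_infer_pov_chars; infer_instance

-- ===== CLAIM (what is proved, stated in full; the proofs are below) =====
def Claim_equal_infer_pov_chars : Prop := ∀ (major_chars : List String), Dom_infer_pov_chars major_chars → Spec_infer_pov_chars major_chars (infer_pov_chars major_chars)

-- ===== LEMMAS AND PROOFS =====

-- common normal form for both results: the L-hit and C-hit merged by index order
def pvMerge (oL oC : Option (Int × String)) : List String :=
  match oL, oC with
  | none, none => []
  | some p, none => [p.2]
  | none, some q => [q.2]
  | some p, some q => if p.1 ≤ q.1 then [p.2, q.2] else [q.2, p.2]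

theorem pvFindFirst_ge (xs : List String) (key : String) (i : Int) (p : Int × String)
    (h : pvFindFirst xs key i = some p) : i ≤ p.1 := by
  induction xs generalizing i with
  | nil => simp [pvFindFirst] at h
  | cons name rest ih =>
      simp only [pvFindFirst] at h
      split at h
      · cases h; simp
      · have := ih (i + 1) h; omega

-- when a name's key is `key`, prepending it shifts a different key's scan by one
theorem pvMerge_someL (i : Int) (name : String) (oC : Option (Int × String))
    (h : ∀ q, oC = some q → i < q.1) :
    pvMerge (some (i, name)) oC = name :: pvMerge none oC := by
  cases oC with
  | none => rfl
  | some q =>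
      have := h q rfl
      simp [pvMerge, le_of_lt this]

theorem pvMerge_someC (i : Int) (name : String) (oL : Option (Int × String))
    (h : ∀ q, oL = some q → i < q.1) :
    pvMerge oL (some (i, name)) = name :: pvMerge oL none := by
  cases oL with
  | none => rfl
  | some q =>
      have := h q rfl
      simp [pvMerge, not_le.mpr this]

-- evaluations of A's loop body
theorem stepA_hit (out : List String) (seen : PySem.Set String) (name k : String)
    (hk : pvNormalize name = k) (hmem : k = "liubei" ∨ k = "caocao")
    (hs : PySem.Set.contains seen k = false) :
    pvStepA (out, seen) name = (out ++ [name], PySem.Set.add seen k) := by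
  rcases hmem with rfl | rfl <;>
    · simp [pvStepA, PySem.Dict.get?, List.find?, hk,
        pvPOVKeys, PySem.Set.contains, PySem.Set.ofList, PySem.Set.add, PySem.Set.empty]
      simpa [PySem.Set.contains] using hs

theorem stepA_seen (out : List String) (seen : PySem.Set String) (name k : String)
    (hk : pvNormalize name = k) (hmem : k = "liubei" ∨ k = "caocao")
    (hs : PySem.Set.contains seen k = true) :
    pvStepA (out, seen) name = (out, seen) := by
  rcases hmem with rfl | rfl <;>
    · simp [pvStepA, PySem.Dict.get?, List.find?, hk,
        pvPOVKeys, PySem.Set.contains, PySem.Set.ofList, PySem.Set.add, PySem.Set.empty]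
      simpa [PySem.Set.contains] using hs

theorem stepA_miss (out : List String) (seen : PySem.Set String) (name : String)
    (h1 : pvNormalize name ≠ "liubei") (h2 : pvNormalize name ≠ "caocao") :
    pvStepA (out, seen) name = (out, seen) := by
  have e1 : ("liubei" == pvNormalize name) = false := beq_eq_false_iff_ne.mpr (Ne.symm h1)
  have e2 : ("caocao" == pvNormalize name) = false := beq_eq_false_iff_ne.mpr (Ne.symm h2)
  simp [pvStepA, PySem.Dict.get?, List.find?, e1, e2]

theorem contains_add_self (s : PySem.Set String) (x : String) :
    PySem.Set.contains (PySem.Set.add s x) x = true := by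
  simp [PySem.Set.contains, PySem.Set.add]
  split <;> simp_all

theorem contains_add_other (s : PySem.Set String) (x y : String) (h : y ≠ x) :
    PySem.Set.contains (PySem.Set.add s x) y = PySem.Set.contains s y := by
  simp [PySem.Set.contains, PySem.Set.add]
  split <;> simp [h]

-- the invariant of A's loop: from any state, the output grows by exactly the merge of
-- the first remaining hits of the keys not yet seen
theorem loopA_eq (xs : List String) (i : Int) (out : List String) (seen : PySem.Set String) :
    (xs.foldl pvStepA (out, seen)).1 =
    out ++ pvMerge
      (if PySem.Set.contains seen "liubei" then none else pvFindFirst xs "liubei" i)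
      (if PySem.Set.contains seen "caocao" then none else pvFindFirst xs "caocao" i) := by
  induction xs generalizing i out seen with
  | nil =>
      cases hL : PySem.Set.contains seen "liubei" <;>
      cases hC : PySem.Set.contains seen "caocao" <;>
        simp [pvFindFirst, pvMerge]
  | cons name rest ih =>
      by_cases hk1 : pvNormalize name = "liubei"
      · cases hs : PySem.Set.contains seen "liubei" with
        | true =>
            rw [List.foldl_cons, stepA_seen out seen name "liubei" hk1 (Or.inl rfl) hs,
              ih (i + 1) out seen]
            have hs' : "liubei" ∈ seen := by simpa [PySem.Set.contains] using hs
            simp [pvFindFirst, hk1, hs']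
        | false =>
            rw [List.foldl_cons, stepA_hit out seen name "liubei" hk1 (Or.inl rfl) hs,
              ih (i + 1) (out ++ [name]) (PySem.Set.add seen "liubei")]
            have hff : pvFindFirst (name :: rest) "liubei" i = some (i, name) := by
              simp [pvFindFirst, hk1]
            have hffC : pvFindFirst (name :: rest) "caocao" i
                = pvFindFirst rest "caocao" (i + 1) := by
              simp [pvFindFirst, hk1]
            have hmerge := pvMerge_someL i name
              (if PySem.Set.contains seen "caocao" = true then none
               else pvFindFirst rest "caocao" (i + 1)) (by
                intro q hq
                split at hq
                · exact absurd hq (by simp)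
                · have := pvFindFirst_ge rest "caocao" (i + 1) q hq; omega)
            simp only [contains_add_self, contains_add_other seen "liubei" "caocao" (by decide),
              hff, hffC, List.append_assoc, Bool.false_eq_true, if_false, reduceIte]
            rw [hmerge]
            simp
      · by_cases hk2 : pvNormalize name = "caocao"
        · cases hs : PySem.Set.contains seen "caocao" with
          | true =>
              rw [List.foldl_cons, stepA_seen out seen name "caocao" hk2 (Or.inr rfl) hs,
                ih (i + 1) out seen]
              have hs' : "caocao" ∈ seen := by simpa [PySem.Set.contains] using hs
              simp [pvFindFirst, hk2, hs']
          | false =>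
              rw [List.foldl_cons, stepA_hit out seen name "caocao" hk2 (Or.inr rfl) hs,
                ih (i + 1) (out ++ [name]) (PySem.Set.add seen "caocao")]
              have hff : pvFindFirst (name :: rest) "caocao" i = some (i, name) := by
                simp [pvFindFirst, hk2]
              have hffL : pvFindFirst (name :: rest) "liubei" i
                  = pvFindFirst rest "liubei" (i + 1) := by
                simp [pvFindFirst, hk1]
              have hmerge := pvMerge_someC i name
                (if PySem.Set.contains seen "liubei" = true then none
                 else pvFindFirst rest "liubei" (i + 1)) (by
                  intro q hq
                  split at hq
                  · exact absurd hq (by simp)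
                  · have := pvFindFirst_ge rest "liubei" (i + 1) q hq; omega)
              simp only [contains_add_self, contains_add_other seen "caocao" "liubei" (by decide),
                hff, hffL, List.append_assoc, Bool.false_eq_true, if_false, reduceIte]
              rw [hmerge]
              simp
        · rw [List.foldl_cons, stepA_miss out seen name hk1 hk2, ih (i + 1) out seen]
          simp [pvFindFirst, hk1, hk2]

theorem portA_eq_merge (xs : List String) :
    infer_pov_chars xs = pvMerge (pvFindFirst xs "liubei" 0) (pvFindFirst xs "caocao" 0) := by
  unfold infer_pov_chars
  rw [loopA_eq xs 0 [] PySem.Set.empty]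
  simp [PySem.Set.contains, PySem.Set.empty]

theorem pvFindFirst_ne (xs : List String) (i : Int) (p q : Int × String)
    (hL : pvFindFirst xs "liubei" i = some p) (hC : pvFindFirst xs "caocao" i = some q) :
    p.1 ≠ q.1 := by
  induction xs generalizing i with
  | nil => simp [pvFindFirst] at hL
  | cons name rest ih =>
      by_cases hk : pvNormalize name = "liubei"
      · obtain rfl : (i, name) = p := by simpa [pvFindFirst, hk] using hL
        have hC' : pvFindFirst rest "caocao" (i + 1) = some q := by
          simpa [pvFindFirst, hk] using hC
        have := pvFindFirst_ge rest "caocao" (i + 1) q hC'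
        simp; omega
      · by_cases hk2 : pvNormalize name = "caocao"
        · obtain rfl : (i, name) = q := by simpa [pvFindFirst, hk2] using hC
          have hL' : pvFindFirst rest "liubei" (i + 1) = some p := by
            simpa [pvFindFirst, hk] using hL
          have := pvFindFirst_ge rest "liubei" (i + 1) p hL'
          simp; omega
        · exact ih (i + 1) (by simpa [pvFindFirst, hk] using hL)
            (by simpa [pvFindFirst, hk2] using hC)

theorem portB_eq_merge (xs : List String) :
    infer_pov_chars_alt xs = pvMerge (pvFindFirst xs "liubei" 0) (pvFindFirst xs "caocao" 0) := by
  unfold infer_pov_chars_alt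
  simp only [List.foldl_cons, List.foldl_nil]
  cases hL : pvFindFirst xs "liubei" 0 with
  | none =>
      cases hC : pvFindFirst xs "caocao" 0 with
      | none => simp [pvMerge, PySem.List.sorted]
      | some q =>
          simp only [List.nil_append]
          rw [PySem.List.sorted_eq_self_of_pairwise [q] (fun p => p.1) (by simp)]
          simp [pvMerge]
  | some p =>
      cases hC : pvFindFirst xs "caocao" 0 with
      | none =>
          simp only [List.nil_append]
          rw [PySem.List.sorted_eq_self_of_pairwise [p] (fun p => p.1) (by simp)]
          simp [pvMerge]
      | some q =>
          have hne := pvFindFirst_ne xs 0 p q hL hC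
          simp only [List.nil_append, List.singleton_append]
          by_cases hle : p.1 ≤ q.1
          · rw [PySem.List.sorted_eq_self_of_pairwise [p, q] (fun p => p.1) (by simp [hle])]
            simp [pvMerge, hle]
          · rw [PySem.List.sorted_eq_of_perm_of_pairwise_lt [p, q] [q, p] (fun p => p.1)
              (List.Perm.swap p q []) (by simp; omega)]
            simp [pvMerge, hle]

-- ===== VERDICT (by name: the statement is the Claim_ definition above) =====
theorem infer_pov_chars_spec : Claim_equal_infer_pov_chars := by
  intro major_chars _
  unfold Spec_infer_pov_chars
  rw [portA_eq_merge, portB_eq_merge]
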